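-- pv_equiv track=rewrite | github.com/SooHyuck/EmulatorJSKOR | docs/1.PY | split_drop_files
-- ===== SOURCE A (Python) =====
-- def split_drop_files(data):
--     # 여러 파일이 공백으로 구분되어 들어옴, 경로에 공백 있으면 중복될 수 있어 "{" "}" 처리 고려
--     if data.startswith("{") and data.endswith("}"):
--         # 중괄호 묶음 여러개로 분할
--         parts = []
--         temp = ""
--         in_brace = False
--         for c in data:
--             if c == "{":
--                 in_brace = True
--                 temp = ""
--             elif c == "}":
--                 in_brace = False
--                 parts.append(temp)
--             elif in_brace:
--                 temp += c
--             elif c == " " and not in_brace: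
--                 continue
--             else:
--                 temp += c
--         return parts
--     else:
--         return data.split()
-- ===== SOURCE B (Python) =====
-- def split_drop_files(data):
--     # Tk-style list: "{a b} {c d}" -> each {...} group is one item; otherwise whitespace split.
--     if data.startswith("{") and data.endswith("}"):
--         items = []
--         for seg in data.split("}")[:-1]:
--             i = seg.rfind("{")
--             items.append(seg[i + 1:] if i >= 0 else seg.replace(" ", ""))
--         return items
--     else:
--         return data.split()
-- ===== Notes on version B (the rewrite author's own statement) =====
-- stated objective: alternative
-- what changed: Replaces A's single-pass character state machine (in_brace flag, mutable temp buffer) with a segment decomposition: split on closing braces and map each segment independently to the text after its last opening brace (rfind/slice) or, absent one, the segment with spaces removed.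
-- intended difference: On brace-wrapped inputs where some closing-brace-terminated segment contains no opening brace while A's buffer from the previous item is nonempty (malformed groups), A prepends the stale leftover buffer to the item, while B returns each segment on its own, the intended per-group value since A's carry is leftover loop state. — e.g. on split_drop_files("{a }b}"): A returns ["a ", "a b"], B returns ["a ", "b"]
import Mathlib
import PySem

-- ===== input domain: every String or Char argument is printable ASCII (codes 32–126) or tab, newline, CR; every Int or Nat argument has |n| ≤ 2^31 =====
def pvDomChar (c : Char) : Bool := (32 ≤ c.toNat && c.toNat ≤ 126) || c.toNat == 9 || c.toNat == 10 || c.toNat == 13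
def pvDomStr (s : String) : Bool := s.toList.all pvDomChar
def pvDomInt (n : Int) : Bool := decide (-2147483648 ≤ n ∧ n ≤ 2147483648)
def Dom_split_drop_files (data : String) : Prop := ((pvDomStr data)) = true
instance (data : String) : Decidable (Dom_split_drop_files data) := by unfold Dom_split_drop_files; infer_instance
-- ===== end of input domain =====

-- B replaces A's character state machine by an independent per-segment split-on-'}' computation (alternative decomposition, same cost);
-- on malformed brace-less segments A carries leftover buffer state into the item, B does not (stated as D_ below).


-- ===== PORT A =====
-- A's for-loop over the characters, state (parts, temp, in_brace); branches in Python's order.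
def splitDropLoop : List Char → List (List Char) → List Char → Bool → List (List Char)
  | [], parts, _, _ => parts
  | c :: cs, parts, temp, inb =>
    if c = '{' then splitDropLoop cs parts [] true
    else if c = '}' then splitDropLoop cs (parts ++ [temp]) temp false
    else if inb then splitDropLoop cs parts (temp ++ [c]) inb
    else if c = ' ' then splitDropLoop cs parts temp inb
    else splitDropLoop cs parts (temp ++ [c]) inb

def split_drop_files (data : String) : List String :=
  if PySem.Str.startswith data "{" && PySem.Str.endswith data "}" then
    (splitDropLoop data.toList [] [] false).map String.ofList
  else
    PySem.Str.split₀ data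

-- ===== PORT B =====
-- Source B: for seg in data.split("}")[:-1]: append seg[i+1:] if (i := seg.rfind("{")) >= 0 else seg.replace(" ", "")
def split_drop_files_alt (data : String) : List String :=
  if PySem.Str.startswith data "{" && PySem.Str.endswith data "}" then
    ((PySem.Chars.splitOn data.toList ['}']).dropLast.map
        (fun seg =>
          let i := PySem.Chars.rfind seg ['{']
          if 0 ≤ i then PySem.Chars.slice seg (some (i + 1)) none
          else PySem.Chars.replace seg [' '] [])).map String.ofList
  else
    PySem.Str.split₀ data

-- ===== PRECONDITION & SPEC =====
-- helpers for D_ (input structure only; independent of both ports):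
-- split on '}' (structural form)
def splitC : List Char → List (List Char)
  | [] => [[]]
  | c :: cs =>
    if c = '}' then [] :: splitC cs
    else match splitC cs with
      | [] => [[c]]
      | h :: t => (c :: h) :: t

-- suffix after the LAST '{' of a segment, if any
def albr : List Char → Option (List Char)
  | [] => none
  | c :: cs => if c = '{' then some ((albr cs).getD cs) else albr cs

-- the item a segment contributes given the leftover buffer carried into it
def gseg (seg prev : List Char) : List Char :=
  match albr seg with
  | some r => r
  | none => prev ++ seg.filter (· ≠ ' ')

-- does some brace-less segment receive a NONEMPTY leftover buffer?
def badB : List (List Char) → List Char → Bool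
  | [], _ => false
  | s :: t, prev => (decide (albr s = none) && decide (prev ≠ [])) || badB t (gseg s prev)

-- On brace-wrapped inputs where some closing-brace-terminated segment contains no opening brace while the leftover
-- buffer from the previous item is nonempty (malformed groups), A prepends the stale buffer to the item while B
-- returns each segment on its own, the intended per-group value since A's carry is leftover loop state.
def D_split_drop_files (data : String) : Prop :=
  (PySem.Str.startswith data "{" && PySem.Str.endswith data "}") = true ∧
  badB (splitC data.toList).dropLast [] = true
instance (data : String) : Decidable (D_split_drop_files data) := by unfold D_split_drop_files; infer_instance

def Spec_split_drop_files (data : String) (out : List String) : Prop :=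
  ¬ D_split_drop_files data → out = split_drop_files_alt data
instance (data : String) (out : List String) : Decidable (Spec_split_drop_files data out) := by unfold Spec_split_drop_files; infer_instance

def pvDiffWitness_split_drop_files : String := "{a }b}"
def pvDiffWitnessOut_split_drop_files : (List String) × (List String) := (["a ", "a b"], ["a ", "b"])

-- ===== CLAIM (what is proved, stated in full; the proofs are below) =====
def Claim_unchanged_split_drop_files : Prop := ∀ (data : String), Dom_split_drop_files data → Spec_split_drop_files data (split_drop_files data)
def Claim_changed_split_drop_files : Prop := Dom_split_drop_files (pvDiffWitness_split_drop_files) ∧ D_split_drop_files (pvDiffWitness_split_drop_files) ∧ split_drop_files (pvDiffWitness_split_drop_files) = pvDiffWitnessOut_split_drop_files.1 ∧ split_drop_files_alt (pvDiffWitness_split_drop_files) = pvDiffWitnessOut_split_drop_files.2 ∧ pvDiffWitnessOut_split_drop_files.1 ≠ pvDiffWitnessOut_split_drop_files.2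
def Claim_exact_split_drop_files : Prop := ∀ (data : String), Dom_split_drop_files data → D_split_drop_files data → split_drop_files data ≠ split_drop_files_alt data

-- ===== LEMMAS AND PROOFS =====

-- A's inner per-segment processing (no '}' in a segment)
def procSeg : List Char → List Char → Bool → List Char
  | [], prev, _ => prev
  | c :: cs, prev, inb =>
    if c = '{' then procSeg cs [] true
    else if inb then procSeg cs (prev ++ [c]) true
    else if c = ' ' then procSeg cs prev false
    else procSeg cs (prev ++ [c]) false

-- the per-segment outputs, last segment dropped, prev threaded
def bGo : List (List Char) → List Char → Bool → List (List Char)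
  | [], _, _ => []
  | [_], _, _ => []
  | seg :: s2 :: rest, prev, inb =>
    procSeg seg prev inb :: bGo (s2 :: rest) (procSeg seg prev inb) false

-- closed-form outputs with prev threaded, over the already-dropLast'ed segment list
def aGo : List (List Char) → List Char → List (List Char)
  | [], _ => []
  | s :: t, prev => gseg s prev :: aGo t (gseg s prev)

theorem splitC_ne_nil (l : List Char) : splitC l ≠ [] := by
  cases l with
  | nil => simp [splitC]
  | cons c cs =>
    simp only [splitC]
    split
    · simp
    · split <;> simp_all

theorem bGo_congr (seg seg' : List Char) (t : List (List Char)) (prev prev' : List Char)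
    (inb inb' : Bool) (h : procSeg seg prev inb = procSeg seg' prev' inb') :
    bGo (seg :: t) prev inb = bGo (seg' :: t) prev' inb' := by
  cases t with
  | nil => simp [bGo]
  | cons s2 rest => simp [bGo, h]

theorem splitDropLoop_eq_bGo (cs : List Char) :
    ∀ (parts : List (List Char)) (temp : List Char) (inb : Bool),
    splitDropLoop cs parts temp inb = parts ++ bGo (splitC cs) temp inb := by
  induction cs with
  | nil => intro parts temp inb; simp [splitDropLoop, splitC, bGo]
  | cons c cs ih =>
    intro parts temp inb
    by_cases hlb : c = '{'
    · subst hlb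
      rw [show splitDropLoop ('{' :: cs) parts temp inb = splitDropLoop cs parts [] true from rfl, ih]
      obtain ⟨h, t, hht⟩ : ∃ h t, splitC cs = h :: t := by
        cases hcs : splitC cs with
        | nil => exact absurd hcs (splitC_ne_nil cs)
        | cons h t => exact ⟨h, t, rfl⟩
      have hsc : splitC ('{' :: cs) = ('{' :: h) :: t := by simp [splitC, hht]
      rw [hsc, hht]
      congr 1
      refine (bGo_congr _ _ _ _ _ _ _ ?_).symm
      simp [procSeg]
    · by_cases hrb : c = '}'
      · subst hrb
        have h1 : splitDropLoop ('}' :: cs) parts temp inb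
            = splitDropLoop cs (parts ++ [temp]) temp false := by
          simp [splitDropLoop]
        rw [h1, ih]
        have hsc : splitC ('}' :: cs) = [] :: splitC cs := by simp [splitC]
        rw [hsc]
        obtain ⟨h, t, hht⟩ : ∃ h t, splitC cs = h :: t := by
          cases hcs : splitC cs with
          | nil => exact absurd hcs (splitC_ne_nil cs)
          | cons h t => exact ⟨h, t, rfl⟩
        rw [hht]
        simp [bGo, procSeg, ← hht]
      · -- ordinary character
        obtain ⟨h, t, hht⟩ : ∃ h t, splitC cs = h :: t := by
          cases hcs : splitC cs with
          | nil => exact absurd hcs (splitC_ne_nil cs)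
          | cons h t => exact ⟨h, t, rfl⟩
        have hsc : splitC (c :: cs) = (c :: h) :: t := by
          simp [splitC, hrb, hht]
        rw [hsc]
        by_cases hib : inb = true
        · subst hib
          have h1 : splitDropLoop (c :: cs) parts temp true
              = splitDropLoop cs parts (temp ++ [c]) true := by
            simp [splitDropLoop, hlb, hrb]
          rw [h1, ih, hht]
          congr 1
          refine (bGo_congr _ _ _ _ _ _ _ ?_).symm
          simp [procSeg, hlb]
        · have hib' : inb = false := by simpa using hib
          subst hib'
          by_cases hsp : c = ' '
          · subst hsp
            have h1 : splitDropLoop (' ' :: cs) parts temp false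
                = splitDropLoop cs parts temp false := by
              simp [splitDropLoop, hlb, hrb]
            rw [h1, ih, hht]
            congr 1
            refine (bGo_congr _ _ _ _ _ _ _ ?_).symm
            simp [procSeg, hlb]
          · have h1 : splitDropLoop (c :: cs) parts temp false
                = splitDropLoop cs parts (temp ++ [c]) false := by
              simp [splitDropLoop, hlb, hrb, hsp]
            rw [h1, ih, hht]
            congr 1
            refine (bGo_congr _ _ _ _ _ _ _ ?_).symm
            simp [procSeg, hlb, hsp]

-- procSeg in closed form
theorem procSeg_closed (seg : List Char) :
    ∀ (prev : List Char) (inb : Bool),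
    procSeg seg prev inb =
      match albr seg with
      | some r => r
      | none => prev ++ (if inb then seg else seg.filter (· ≠ ' ')) := by
  induction seg with
  | nil => intro prev inb; cases inb <;> simp [procSeg, albr]
  | cons c cs ih =>
    intro prev inb
    by_cases hlb : c = '{'
    · subst hlb
      have h1 : procSeg ('{' :: cs) prev inb = procSeg cs [] true := by simp [procSeg]
      rw [h1, ih]
      simp only [albr, if_pos]
      cases albr cs <;> simp
    · have halb : albr (c :: cs) = albr cs := by simp [albr, hlb]
      rw [halb]
      by_cases hib : inb = true
      · subst hib
        have h1 : procSeg (c :: cs) prev true = procSeg cs (prev ++ [c]) true := by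
          simp [procSeg, hlb]
        rw [h1, ih]
        cases albr cs <;> simp
      · have hib' : inb = false := by simpa using hib
        subst hib'
        by_cases hsp : c = ' '
        · subst hsp
          have h1 : procSeg (' ' :: cs) prev false = procSeg cs prev false := by
            simp [procSeg, hlb]
          rw [h1, ih]
          cases albr cs <;> simp [List.filter]
        · have h1 : procSeg (c :: cs) prev false = procSeg cs (prev ++ [c]) false := by
            simp [procSeg, hlb, hsp]
          rw [h1, ih]
          cases albr cs <;> simp [List.filter, hsp]

theorem procSeg_eq_gseg (seg prev : List Char) : procSeg seg prev false = gseg seg prev := by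
  rw [procSeg_closed]; simp [gseg]

theorem bGo_eq_aGo (segs : List (List Char)) :
    ∀ prev, bGo segs prev false = aGo segs.dropLast prev := by
  induction segs with
  | nil => intro prev; simp [bGo, aGo]
  | cons s rest ih =>
    intro prev
    cases rest with
    | nil => simp [bGo, aGo]
    | cons s2 rest2 =>
      have : (s :: s2 :: rest2).dropLast = s :: (s2 :: rest2).dropLast := by
        simp [List.dropLast]
      rw [this, bGo, aGo, procSeg_eq_gseg, ih]

-- ['x'].isPrefixOf l = (l.head? == some 'x')
theorem singleton_isPrefixOf (x : Char) (l : List Char) :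
    List.isPrefixOf [x] l = (l.head? == some x) := by
  cases l with
  | nil => simp [List.isPrefixOf]
  | cons c cs => simp [List.isPrefixOf, BEq.comm]

theorem find?_congr_mem {α : Type} (l : List α) (p q : α → Bool)
    (h : ∀ a ∈ l, p a = q a) : l.find? p = l.find? q := by
  induction l with
  | nil => rfl
  | cons a l ih =>
    simp only [List.find?]
    rw [h a (by simp)]
    cases q a
    · exact ih (fun x hx => h x (by simp [hx]))
    · rfl

-- rfind.go characterized by a reverse-range find?
theorem rfind_go_eq (s : List Char) (j : ℕ) :
    PySem.Chars.rfind.go s ['{'] j =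
      match (List.range (j + 1)).reverse.find? (fun k => s[k]? == some '{') with
      | some k => (k : ℤ)
      | none => -1 := by
  induction j with
  | zero =>
    simp only [PySem.Chars.rfind.go, List.range_succ, List.range_zero, List.nil_append,
      List.reverse_cons, List.reverse_nil, List.find?]
    rw [singleton_isPrefixOf]
    have : s.head? = s[0]? := by cases s <;> rfl
    rw [this]
    cases (s[0]? == some '{') <;> simp
  | succ j ih =>
    have hgo : PySem.Chars.rfind.go s ['{'] (j + 1)
        = if List.isPrefixOf ['{'] (List.drop (j + 1) s) then ((j : ℤ) + 1)
          else PySem.Chars.rfind.go s ['{'] j := by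
      simp [PySem.Chars.rfind.go]
    rw [hgo, singleton_isPrefixOf]
    have hh : (List.drop (j + 1) s).head? = s[j + 1]? := by
      simp [List.head?_drop]
    rw [hh]
    have hr : (List.range (j + 1 + 1)).reverse = (j + 1) :: (List.range (j + 1)).reverse := by
      rw [List.range_succ, List.reverse_append]; rfl
    rw [hr]
    simp only [List.find?]
    cases (s[j + 1]? == some '{') <;> simp [ih]

def lbF (s : List Char) : Option ℕ :=
  (List.range s.length).reverse.find? (fun k => s[k]? == some '{')

theorem rfind_eq_lbF (s : List Char) :
    PySem.Chars.rfind s ['{'] = match lbF s with | some k => (k : ℤ) | none => -1 := by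
  have h0 : PySem.Chars.rfind s ['{'] = PySem.Chars.rfind.go s ['{'] s.length := rfl
  rw [h0, rfind_go_eq]
  have hr : (List.range (s.length + 1)).reverse = s.length :: (List.range s.length).reverse := by
    rw [List.range_succ, List.reverse_append]; rfl
  rw [hr]
  simp only [List.find?]
  have : (s[s.length]? == some '{') = false := by simp
  rw [this, lbF]

theorem albr_append (s : List Char) (c : Char) :
    albr (s ++ [c]) = if c = '{' then some [] else (albr s).map (· ++ [c]) := by
  induction s with
  | nil => by_cases hc : c = '{' <;> simp [albr, hc]
  | cons d s ih =>
    by_cases hc : c = '{'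
    · subst hc
      simp only at ih ⊢
      by_cases hd : d = '{'
      · subst hd; simp [albr, ih]
      · simp [albr, hd, ih]
    · simp only [if_neg hc] at ih ⊢
      by_cases hd : d = '{'
      · subst hd
        simp only [List.cons_append, albr, ih]
        cases albr s <;> simp
      · simp [albr, hd, ih]

theorem lbF_albr (s : List Char) :
    albr s = (lbF s).map (fun k => s.drop (k + 1)) := by
  induction s using List.reverseRecOn with
  | nil => simp [albr, lbF]
  | append_singleton s c ih =>
    rw [albr_append]
    have hlen : (s ++ [c]).length = s.length + 1 := by simp
    have hr : (List.range (s.length + 1)).reverse = s.length :: (List.range s.length).reverse := by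
      rw [List.range_succ, List.reverse_append]; rfl
    have hlbF : lbF (s ++ [c]) =
        ((s.length : ℕ) :: (List.range s.length).reverse).find?
          (fun k => (s ++ [c])[k]? == some '{') := by
      rw [lbF, hlen, hr]
    by_cases hc : c = '{'
    · subst hc
      have hb : ((s ++ ['{'])[s.length]? == some '{') = true := by
        simp
      rw [if_pos rfl, hlbF]
      simp only [List.find?, hb]
      simp
    · have hb : ((s ++ [c])[s.length]? == some '{') = false := by
        simp [hc]
      rw [if_neg hc, hlbF]
      simp only [List.find?, hb]
      have hcongr : (List.range s.length).reverse.find? (fun k => (s ++ [c])[k]? == some '{')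
          = (List.range s.length).reverse.find? (fun k => s[k]? == some '{') := by
        apply find?_congr_mem
        intro k hk
        have hklt : k < s.length := by
          have := List.mem_reverse.mp hk
          simpa using List.mem_range.mp this
        rw [List.getElem?_append_left hklt]
      rw [hcongr, ih]
      cases hfs : (List.range s.length).reverse.find? (fun k => s[k]? == some '{') with
      | none => simp [lbF, hfs]
      | some k =>
        have hklt : k < s.length := by
          have := List.mem_of_find?_eq_some hfs
          have := List.mem_reverse.mp this
          simpa using List.mem_range.mp this
        simp only [lbF, hfs, Option.map_some]
        rw [List.drop_append_of_le_length (by omega)]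

-- replace(" ", "") is filter
theorem replace_go_space (fuel : ℕ) :
    ∀ (l acc : List Char), l.length ≤ fuel →
    PySem.Chars.replace.go [' '] [] fuel l acc = acc.reverse ++ l.filter (· ≠ ' ') := by
  induction fuel with
  | zero =>
    intro l acc hl
    have : l = [] := by cases l <;> simp_all
    subst this
    simp [PySem.Chars.replace.go]
  | succ fuel ih =>
    intro l acc hl
    cases l with
    | nil => simp [PySem.Chars.replace.go]
    | cons c t =>
      have hgo : PySem.Chars.replace.go [' '] [] (fuel + 1) (c :: t) acc
          = if List.isPrefixOf [' '] (c :: t)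
            then PySem.Chars.replace.go [' '] [] fuel (List.drop 1 (c :: t)) acc
            else PySem.Chars.replace.go [' '] [] fuel t (c :: acc) := by
        simp [PySem.Chars.replace.go]
      rw [hgo, singleton_isPrefixOf]
      by_cases hc : c = ' '
      · subst hc
        simp only [List.head?_cons, beq_self_eq_true, if_pos, List.drop_one, List.tail_cons]
        rw [ih t acc (by simpa using hl)]
        simp [List.filter]
      · have hb : ((c :: t).head? == some ' ') = false := by simp [hc]
        rw [hb]
        simp only [Bool.false_eq_true, if_false]
        rw [ih t (c :: acc) (by simpa using hl)]
        simp [List.filter, hc]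

theorem replace_space (l : List Char) :
    PySem.Chars.replace l [' '] [] = l.filter (· ≠ ' ') := by
  have : PySem.Chars.replace l [' '] [] = PySem.Chars.replace.go [' '] [] l.length l [] := by
    simp [PySem.Chars.replace]
  rw [this, replace_go_space l.length l [] le_rfl]
  simp

-- B's per-segment step equals gseg · []
theorem bstep_eq (seg : List Char) :
    (if 0 ≤ PySem.Chars.rfind seg ['{']
     then PySem.Chars.slice seg (some (PySem.Chars.rfind seg ['{'] + 1)) none
     else PySem.Chars.replace seg [' '] []) = gseg seg [] := by
  rw [gseg, lbF_albr, rfind_eq_lbF, replace_space]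
  cases hf : lbF seg with
  | none => simp
  | some k =>
    have h0 : (0 : ℤ) ≤ (k : ℤ) := by positivity
    simp only [Option.map_some, if_pos h0]
    have : ((k : ℤ) + 1) = ((k + 1 : ℕ) : ℤ) := by push_cast; ring
    simp only [PySem.Chars.slice_eq_listSlice]
    rw [this, PySem.List.slice_from_natCast]

-- splitOn on ['}'] is splitC
def prepHead (p : List Char) : List (List Char) → List (List Char)
  | [] => [p]
  | h :: t => (p ++ h) :: t

theorem splitOn_go_eq (fuel : ℕ) :
    ∀ (l cur : List Char) (acc : List (List Char)), l.length ≤ fuel →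
    PySem.Chars.splitOn.go ['}'] fuel l cur acc = acc.reverse ++ prepHead cur.reverse (splitC l) := by
  induction fuel with
  | zero =>
    intro l cur acc hl
    have : l = [] := by cases l <;> simp_all
    subst this
    simp [PySem.Chars.splitOn.go, splitC, prepHead]
  | succ fuel ih =>
    intro l cur acc hl
    cases l with
    | nil => simp [PySem.Chars.splitOn.go, splitC, prepHead]
    | cons c t =>
      have hgo : PySem.Chars.splitOn.go ['}'] (fuel + 1) (c :: t) cur acc
          = if List.isPrefixOf ['}'] (c :: t)
            then PySem.Chars.splitOn.go ['}'] fuel (List.drop 1 (c :: t)) [] (cur.reverse :: acc)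
            else PySem.Chars.splitOn.go ['}'] fuel t (c :: cur) acc := by
        simp [PySem.Chars.splitOn.go]
      rw [hgo, singleton_isPrefixOf]
      by_cases hc : c = '}'
      · subst hc
        simp only [List.head?_cons, beq_self_eq_true, if_pos, List.drop_one, List.tail_cons]
        rw [ih t [] (cur.reverse :: acc) (by simpa using hl)]
        have hsp : splitC ('}' :: t) = [] :: splitC t := by simp [splitC]
        rw [hsp]
        obtain ⟨h, t', hht⟩ : ∃ h t', splitC t = h :: t' := by
          cases hcs : splitC t with
          | nil => exact absurd hcs (splitC_ne_nil t)
          | cons h t' => exact ⟨h, t', rfl⟩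
        rw [hht]
        simp [prepHead]
      · have hb : ((c :: t).head? == some '}') = false := by simp [hc]
        rw [hb]
        simp only [Bool.false_eq_true, if_false]
        rw [ih t (c :: cur) acc (by simpa using hl)]
        obtain ⟨h, t', hht⟩ : ∃ h t', splitC t = h :: t' := by
          cases hcs : splitC t with
          | nil => exact absurd hcs (splitC_ne_nil t)
          | cons h t' => exact ⟨h, t', rfl⟩
        have hsp : splitC (c :: t) = (c :: h) :: t' := by simp [splitC, hc, hht]
        rw [hsp, hht]
        simp [prepHead]

theorem splitOn_eq_splitC (s : List Char) :
    PySem.Chars.splitOn s ['}'] = splitC s := by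
  have h0 : PySem.Chars.splitOn s ['}'] = PySem.Chars.splitOn.go ['}'] (s.length + 1) s [] [] := rfl
  rw [h0, splitOn_go_eq (s.length + 1) s [] [] (by omega)]
  obtain ⟨h, t, hht⟩ : ∃ h t, splitC s = h :: t := by
    cases hcs : splitC s with
    | nil => exact absurd hcs (splitC_ne_nil s)
    | cons h t => exact ⟨h, t, rfl⟩
  rw [hht]
  simp [prepHead]

-- where no brace-less segment ever sees a nonempty buffer, the threaded outputs are the independent ones
theorem aGo_eq_map (l : List (List Char)) :
    ∀ prev, badB l prev = false → aGo l prev = l.map (fun s => gseg s []) := by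
  induction l with
  | nil => intro prev _; simp [aGo]
  | cons s t ih =>
    intro prev hb
    simp only [badB, Bool.or_eq_false_iff, Bool.and_eq_false_iff] at hb
    obtain ⟨h1, h2⟩ := hb
    have hhead : gseg s prev = gseg s [] := by
      rcases h1 with h | h
      · have : albr s ≠ none := by simpa using h
        cases hs : albr s with
        | none => exact absurd hs this
        | some r => simp [gseg, hs]
      · have : prev = [] := by simpa using h
        subst this; rfl
    rw [aGo, List.map_cons, hhead, ih _ (by rw [← hhead]; exact h2)]

theorem aGo_ne_map (l : List (List Char)) :
    ∀ prev, badB l prev = true → aGo l prev ≠ l.map (fun s => gseg s []) := by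
  induction l with
  | nil => intro prev hb; simp [badB] at hb
  | cons s t ih =>
    intro prev hb
    simp only [badB, Bool.or_eq_true] at hb
    by_cases hbad : albr s = none ∧ prev ≠ []
    · obtain ⟨hn, hp⟩ := hbad
      have hhead : gseg s prev ≠ gseg s [] := by
        simp only [gseg, hn]
        intro h
        have := congrArg List.length h
        simp at this
        exact hp this
      simp only [aGo, List.map_cons]
      intro h
      injection h with h1 _
      exact hhead h1
    · have hrec : badB t (gseg s prev) = true := by
        rcases hb with h | h
        · exfalso; apply hbad
          constructor
          · simpa using (Bool.and_elim_left h)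
          · simpa using (Bool.and_elim_right h)
        · exact h
      have hhead : gseg s prev = gseg s [] := by
        rcases not_and_or.mp hbad with h | h
        · cases hs : albr s with
          | none => exact absurd hs h
          | some r => simp [gseg, hs]
        · have : prev = [] := not_not.mp h
          subst this; rfl
      simp only [aGo, List.map_cons]
      intro h
      injection h with _ h2
      exact ih _ (hhead ▸ hrec) (hhead ▸ h2)

theorem mapB_eq (l : List (List Char)) :
    l.map (fun seg =>
        let i := PySem.Chars.rfind seg ['{']
        if 0 ≤ i then PySem.Chars.slice seg (some (i + 1)) none
        else PySem.Chars.replace seg [' '] []) = l.map (fun s => gseg s []) := by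
  apply List.map_congr_left
  intro seg _
  simpa using bstep_eq seg

theorem ofList_injective : Function.Injective String.ofList := by
  intro a b h
  have := congrArg String.toList h
  simpa using this

-- ===== VERDICT (by name: the statements are the Claim_ definitions above) =====
theorem split_drop_files_spec : Claim_unchanged_split_drop_files := by
  intro data _
  unfold Spec_split_drop_files
  intro hnd
  unfold split_drop_files split_drop_files_alt
  by_cases hg : (PySem.Str.startswith data "{" && PySem.Str.endswith data "}") = true
  · rw [if_pos hg, if_pos hg]
    have hb : badB (splitC data.toList).dropLast [] = false := by
      by_contra h
      exact hnd ⟨hg, by simpa using h⟩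
    congr 1
    rw [splitDropLoop_eq_bGo data.toList [] [] false, List.nil_append,
      splitOn_eq_splitC, bGo_eq_aGo, aGo_eq_map _ _ hb, mapB_eq]
  · rw [if_neg hg, if_neg hg]

theorem split_drop_files_changed : Claim_changed_split_drop_files := by
  unfold Claim_changed_split_drop_files; decide

theorem split_drop_files_tight : Claim_exact_split_drop_files := by
  intro data _ hd
  obtain ⟨hg, hb⟩ := hd
  unfold split_drop_files split_drop_files_alt
  rw [if_pos hg, if_pos hg]
  intro h
  have h2 := List.map_injective_iff.mpr ofList_injective h
  rw [splitDropLoop_eq_bGo data.toList [] [] false, List.nil_append,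
    splitOn_eq_splitC, bGo_eq_aGo, mapB_eq] at h2
  exact aGo_ne_map _ _ hb h2
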